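-- pv_equiv track=rewrite | github.com/parkseo7/industrial-deep-learning | scripts/libs/funLib.py | obtainCollection
-- ===== SOURCE A (Python) =====
-- def obtainCollection(listNames):
--     '''
--     Function for obtaining a collection of groups (sublists) with indices that correspond to common names.
--     '''
--
--     N = len(list(listNames))
--     collectionNames = []
--     collectionInds = []
--
--     for i in range(N):
--         name = listNames[i]
--         if name in collectionNames:
--             ind = collectionNames.index(name)
--             collectionInds[ind].append(i)
--
--         else:
--             collectionNames.append(name)
--             collectionInds.append([i])
--
--     return (collectionNames, collectionInds)
-- ===== SOURCE B (Python) =====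
-- def obtainCollection(listNames):
--     '''
--     Two staged passes: first the distinct names in first-appearance order
--     (dict.fromkeys), then for each name collect its occurrence indices by
--     repeated list.index scans with a moving start offset.
--     '''
--     names = list(dict.fromkeys(listNames))
--     collection = []
--     for name in names:
--         idxs = []
--         start = 0
--         while True:
--             try:
--                 j = listNames.index(name, start)
--             except ValueError:
--                 break
--             idxs.append(j)
--             start = j + 1
--         collection.append(idxs)
--     return (names, collection)
-- ===== Notes on version B (the rewrite author's own statement) =====
-- stated objective: alternative
-- what changed: Replaces A's single-pass accumulation into two parallel lists (membership test + .index on the growing names list per element) by two staged passes: an ordered dedup of the names first, then an inner loop per distinct name that gathers its occurrence indices with repeated list.index(name, start) scans of the input.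
import Mathlib
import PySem

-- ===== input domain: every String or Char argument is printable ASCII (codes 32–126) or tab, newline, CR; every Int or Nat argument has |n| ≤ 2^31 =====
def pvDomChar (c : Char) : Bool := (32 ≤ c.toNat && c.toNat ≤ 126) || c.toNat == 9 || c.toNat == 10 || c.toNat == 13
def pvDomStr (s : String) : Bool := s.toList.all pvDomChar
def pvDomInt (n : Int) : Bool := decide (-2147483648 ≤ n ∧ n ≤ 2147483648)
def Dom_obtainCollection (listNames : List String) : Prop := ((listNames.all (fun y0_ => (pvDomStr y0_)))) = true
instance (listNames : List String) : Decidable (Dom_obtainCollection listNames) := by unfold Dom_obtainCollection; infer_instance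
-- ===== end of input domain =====

-- B replaces A's single-pass parallel-lists accumulation by two staged passes: an
-- ordered dedup of the names, then per name an inner loop of list.index(name, start)
-- scans collecting its indices (an alternative decomposition, not claimed faster).


-- ===== PORT A =====
-- A's loop body: membership test + .index on the names list, append i into
-- collectionInds[ind] (list mutation at an index = List.set) or start a new group.
def pvStepA (st : List String × List (List Int)) (p : Int × String) :
    List String × List (List Int) :=
  if st.1.contains p.2 then
    let ind := (PySem.List.index? st.1 p.2).getD 0
    (st.1, st.2.set ind (st.2.getD ind [] ++ [p.1]))
  else
    (st.1 ++ [p.2], st.2 ++ [[p.1]])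

-- for i in range(N): name = listNames[i]; … (i is always in range, so pyGetD is exact)
def obtainCollection (listNames : List String) : List String × List (List Int) :=
  (PySem.List.pyRange 0 (PySem.List.len listNames) 1).foldl
    (fun st i => pvStepA st (i, PySem.List.pyGetD listNames i "")) ([], [])

-- ===== PORT B =====
-- inner while-True loop: listNames.index(name, start) = index? on the dropped
-- suffix (none = ValueError, which breaks the loop); start moves past each hit.
def pvCollect (listNames : List String) (name : String) (start : Nat) : List Int :=
  match h : PySem.List.index? (listNames.drop start) name with
  | none => []
  | some j => ((start + j : Nat) : Int) :: pvCollect listNames name (start + j + 1)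
termination_by listNames.length - start
decreasing_by
  obtain ⟨hk, -, -⟩ := PySem.List.getElem_of_index?_eq_some h
  simp [List.length_drop] at hk
  omega

-- names = list(dict.fromkeys(listNames)); then one bucket of indices per name
def obtainCollection_alt (listNames : List String) : List String × List (List Int) :=
  (PySem.List.dedup listNames,
   (PySem.List.dedup listNames).map (fun name => pvCollect listNames name 0))

-- ===== PRECONDITION & SPEC =====
def Spec_obtainCollection (listNames : List String) (out : List String × List (List Int)) : Prop := out = obtainCollection_alt listNames
instance (listNames : List String) (out : List String × List (List Int)) : Decidable (Spec_obtainCollection listNames out) := by unfold Spec_obtainCollection; infer_instance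

-- ===== CLAIM (what is proved, stated in full; the proofs are below) =====
def Claim_equal_obtainCollection : Prop := ∀ (listNames : List String), Dom_obtainCollection listNames → Spec_obtainCollection listNames (obtainCollection listNames)

-- ===== LEMMAS AND PROOFS =====

-- dict.fromkeys's ordered dedup, one element at a time from the right
theorem dedup_append_singleton (l : List String) (a : String) :
    PySem.List.dedup (l ++ [a])
      = if a ∈ l then PySem.List.dedup l else PySem.List.dedup l ++ [a] := by
  simp only [PySem.List.dedup_eq_ofList, PySem.Set.ofList_append_singleton]
  by_cases hm : a ∈ l
  · rw [if_pos hm]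
    simp [PySem.Set.add, PySem.Set.contains, PySem.Set.mem_ofList, hm]
  · rw [if_neg hm]
    simp [PySem.Set.add, PySem.Set.contains, PySem.Set.mem_ofList, hm]

-- rewriting a Nodup list's mapped image at the (unique) position of `a`
theorem pv_map_set_nodup (a : String) (f g : String → List Int) :
    ∀ (l : List String) (j : Nat), l.Nodup → l[j]? = some a →
      (∀ x ∈ l, x ≠ a → g x = f x) →
      (l.map f).set j (g a) = l.map g := by
  intro l
  induction l with
  | nil => intro j _ hget; simp at hget
  | cons x xs ih =>
    intro j hnd hget hcong
    cases j with
    | zero =>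
      have hx : x = a := by simpa using hget
      show g a :: xs.map f = g x :: xs.map g
      rw [hx]
      congr 1
      apply List.map_congr_left
      intro y hy
      have hyx : y ≠ a := fun hc => (List.nodup_cons.mp hnd).1 (by rw [hx, ← hc]; exact hy)
      exact (hcong y (List.mem_cons_of_mem _ hy) hyx).symm
    | succ k =>
      simp only [List.getElem?_cons_succ] at hget
      have hxa : x ≠ a := by
        intro h
        subst h
        exact (List.nodup_cons.mp hnd).1 (List.mem_of_getElem? hget)
      simp only [List.map_cons, List.set_cons_succ, List.cons.injEq]
      exact ⟨(hcong x (by simp) hxa).symm,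
        ih k (List.nodup_cons.mp hnd).2 hget (fun y hy => hcong y (by simp [hy]))⟩

-- B's state after processing the pairs q: distinct names seen so far, with each
-- name's bucket of first components
def pvStB (q : List (Int × String)) : List String × List (List Int) :=
  (PySem.List.dedup (q.map (·.2)),
   (PySem.List.dedup (q.map (·.2))).map (fun n => (q.filter (fun p => p.2 == n)).map (·.1)))

theorem pv_step_eq (q : List (Int × String)) (p : Int × String) :
    pvStepA (pvStB q) p = pvStB (q ++ [p]) := by
  set K := PySem.List.dedup (q.map (·.2)) with hK
  have hmemK : ∀ b, b ∈ K ↔ b ∈ q.map (·.2) := fun b => PySem.List.mem_dedup _ b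
  have hmap : (q ++ [p]).map (·.2) = q.map (·.2) ++ [p.2] := by simp
  have hfilter : ∀ n, (q ++ [p]).filter (fun r => r.2 == n)
      = q.filter (fun r => r.2 == n) ++ (if p.2 = n then [p] else []) := by
    intro n
    rw [List.filter_append]
    by_cases hpn : p.2 = n <;> simp [hpn]
  by_cases hmem : p.2 ∈ q.map (·.2)
  · -- existing name
    have hcont : K.contains p.2 = true := by
      have : p.2 ∈ K := (hmemK _).mpr hmem
      simpa using this
    have hsome : (PySem.List.index? K p.2).isSome := by
      rw [PySem.List.index?_isSome_iff]
      exact (hmemK _).mpr hmem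
    obtain ⟨j, hj⟩ := Option.isSome_iff_exists.mp hsome
    obtain ⟨hjlt, hjget, _⟩ := PySem.List.getElem_of_index?_eq_some hj
    have hnames : PySem.List.dedup ((q ++ [p]).map (·.2)) = K := by
      rw [hmap, dedup_append_singleton, if_pos hmem]
    unfold pvStepA pvStB
    rw [if_pos hcont]
    simp only [hj, Option.getD_some, hnames, ← hK]
    refine Prod.ext rfl ?_
    show (K.map _).set j _ = K.map _
    have hgetD : (K.map (fun n => (q.filter (fun r => r.2 == n)).map (·.1))).getD j []
        = (q.filter (fun r => r.2 == p.2)).map (·.1) := by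
      rw [List.getD_eq_getElem _ _ (by simpa using hjlt)]
      simp [hjget]
    rw [hgetD]
    simp only [hfilter]
    have hval : (q.filter (fun r => r.2 == p.2)).map (·.1) ++ [p.1]
        = ((q.filter (fun r => r.2 == p.2) ++ if p.2 = p.2 then [p] else []).map (·.1)) := by
      simp
    rw [hval]
    apply pv_map_set_nodup p.2
      (fun n => (q.filter (fun r => r.2 == n)).map (·.1))
      (fun n => ((q.filter (fun r => r.2 == n) ++ if p.2 = n then [p] else []).map (·.1)))
      K j (PySem.List.nodup_dedup _)
      (by rw [List.getElem?_eq_getElem hjlt]; exact congrArg some hjget)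
    intro x _ hx
    simp [show ¬(p.2 = x) from fun h => hx (h ▸ rfl)]
  · -- fresh name
    have hcont : ¬ (K.contains p.2 = true) := by
      simp only [List.contains_eq_mem, decide_eq_true_eq]
      rw [hmemK]; exact hmem
    have hnames : PySem.List.dedup ((q ++ [p]).map (·.2)) = K ++ [p.2] := by
      rw [hmap, dedup_append_singleton, if_neg hmem]
    unfold pvStepA pvStB
    rw [if_neg hcont]
    simp only [hnames, ← hK]
    refine Prod.ext rfl ?_
    show K.map _ ++ [[p.1]] = (K ++ [p.2]).map _
    rw [List.map_append]
    congr 1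
    · apply List.map_congr_left
      intro x hx
      rw [hfilter]
      have hxne : ¬(p.2 = x) := fun h => hmem (by rw [h]; exact (hmemK x).mp hx)
      simp [hxne]
    · have hempty : q.filter (fun r => r.2 == p.2) = [] := by
        rw [List.filter_eq_nil_iff]
        intro r hr hbeq
        exact hmem (by
          have : r.2 = p.2 := by simpa using hbeq
          exact this ▸ List.mem_map_of_mem hr)
      simp [hfilter, hempty]

theorem pv_fold_inv : ∀ (ps : List (Int × String)) (q : List (Int × String)),
    ps.foldl pvStepA (pvStB q) = pvStB (q ++ ps) := by
  intro ps
  induction ps with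
  | nil => intro q; simp
  | cons p ps ih =>
    intro q
    rw [List.foldl_cons, pv_step_eq, ih]
    congr 1
    simp

-- A's range-with-indexing loop is the same fold taken over enumerate(listNames)
theorem pv_foldA_eq (listNames : List String) :
    obtainCollection listNames
      = (PySem.List.enumerate listNames).foldl pvStepA ([], []) := by
  unfold obtainCollection
  rw [PySem.List.enumerate_eq_map_pyRange listNames "", List.foldl_map]

-- the collected indices of `name` from offset `start` are exactly the matching
-- positions of the remaining suffix (what the enumerate filter computes)
theorem pv_collect_eq (l : List String) (name : String) : ∀ (start : Nat),
    pvCollect l name start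
      = ((PySem.List.enumerate (l.drop start) start).filter
          (fun p => p.2 == name)).map (·.1) := by
  intro start
  induction hn : l.length - start using Nat.strong_induction_on generalizing start with
  | _ n ih =>
    rw [pvCollect.eq_def]
    cases hidx : PySem.List.index? (l.drop start) name with
    | none =>
      have hnot : name ∉ l.drop start := (PySem.List.index?_eq_none_iff _ _).mp hidx
      rw [List.filter_eq_nil_iff.mpr ?_, List.map_nil]
      intro p hp
      obtain ⟨k, hk, rfl⟩ := (PySem.List.mem_enumerate_iff _ _ _).mp hp
      simp only [beq_iff_eq]
      intro hq
      exact hnot (hq ▸ List.getElem_mem hk)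
    | some j =>
      obtain ⟨pre, suf, hdrop, hlen, hpre⟩ := (PySem.List.index?_eq_some_iff _ _ _).mp hidx
      obtain ⟨hjlt, -, -⟩ := PySem.List.getElem_of_index?_eq_some hidx
      have hsuf : l.drop (start + j + 1) = suf := by
        have : l.drop (start + j + 1) = (l.drop start).drop (j + 1) := by
          rw [List.drop_drop]
          congr 1
        rw [this, hdrop]
        have h2 : pre ++ name :: suf = (pre ++ [name]) ++ suf := by simp
        have h3 : j + 1 = (pre ++ [name]).length := by simp [hlen]
        rw [h2, h3, List.drop_left]
      have hfpre : (PySem.List.enumerate pre (start : Int)).filter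
          (fun p => p.2 == name) = [] := by
        apply List.filter_eq_nil_iff.mpr
        intro p hp
        obtain ⟨k, hk, rfl⟩ := (PySem.List.mem_enumerate_iff _ _ _).mp hp
        simp only [beq_iff_eq]
        intro hq
        exact hpre (hq ▸ List.getElem_mem hk)
      have hrec := ih (l.length - (start + j + 1))
        (by simp [List.length_drop] at hjlt; omega) (start + j + 1) rfl
      rw [hdrop, PySem.List.enumerate_append, List.filter_append, hfpre,
        List.nil_append, PySem.List.enumerate_cons, hlen]
      simp only [beq_self_eq_true, List.filter_cons_of_pos, List.map_cons]
      rw [hsuf] at hrec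
      rw [hrec]
      push_cast
      rfl

-- ===== VERDICT (by name: the statement is the Claim_ definition above) =====
theorem obtainCollection_spec : Claim_equal_obtainCollection := by
  intro listNames _
  unfold Spec_obtainCollection obtainCollection_alt
  rw [pv_foldA_eq]
  have h0 : (([], []) : List String × List (List Int)) = pvStB [] := by
    simp [pvStB, PySem.List.dedup]
  rw [h0, pv_fold_inv, List.nil_append]
  unfold pvStB
  rw [PySem.List.map_snd_enumerate]
  refine Prod.ext rfl ?_
  show List.map _ _ = List.map _ _
  apply List.map_congr_left
  intro name _
  have := pv_collect_eq listNames name 0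
  simp only [List.drop_zero] at this
  rw [this]
  norm_num
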